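-- pv_equiv track=rewrite | github.com/kychanh/Point-DeepONet | 99. FuckNet/render_inverse_trajectory.py | find_snapshot_by_iter
-- ===== SOURCE A (Python) =====
-- def find_snapshot_by_iter(traj, target_iter):
--     exact = [x for x in traj if int(x["iter"]) == int(target_iter)]
--     if exact:
--         return exact[0]
--
--     le = [x for x in traj if int(x["iter"]) <= int(target_iter)]
--     if le:
--         return max(le, key=lambda x: int(x["iter"]))
--
--     return min(traj, key=lambda x: int(x["iter"]))
-- ===== SOURCE B (Python) =====
-- def find_snapshot_by_iter(traj, target_iter):
--     # single pass: early return on exact match; track first-best <= target and first-smallest overall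
--     t = int(target_iter)
--     best_le = None
--     best_min = None
--     for x in traj:
--         v = int(x["iter"])
--         if v == t:
--             return x
--         if v <= t and (best_le is None or v > int(best_le["iter"])):
--             best_le = x
--         if best_min is None or v < int(best_min["iter"]):
--             best_min = x
--     if best_le is not None:
--         return best_le
--     if best_min is None:
--         raise ValueError("min() arg is an empty sequence")
--     return best_min
-- ===== Notes on version B (the rewrite author's own statement) =====
-- stated objective: faster
-- what changed: Replaced A's three full passes (exact-filter list, <=-filter list, then max/min over the filtered lists) by one short-circuiting loop that keeps only two running candidates and returns immediately on an exact match, building no intermediate lists.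
import Mathlib
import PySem

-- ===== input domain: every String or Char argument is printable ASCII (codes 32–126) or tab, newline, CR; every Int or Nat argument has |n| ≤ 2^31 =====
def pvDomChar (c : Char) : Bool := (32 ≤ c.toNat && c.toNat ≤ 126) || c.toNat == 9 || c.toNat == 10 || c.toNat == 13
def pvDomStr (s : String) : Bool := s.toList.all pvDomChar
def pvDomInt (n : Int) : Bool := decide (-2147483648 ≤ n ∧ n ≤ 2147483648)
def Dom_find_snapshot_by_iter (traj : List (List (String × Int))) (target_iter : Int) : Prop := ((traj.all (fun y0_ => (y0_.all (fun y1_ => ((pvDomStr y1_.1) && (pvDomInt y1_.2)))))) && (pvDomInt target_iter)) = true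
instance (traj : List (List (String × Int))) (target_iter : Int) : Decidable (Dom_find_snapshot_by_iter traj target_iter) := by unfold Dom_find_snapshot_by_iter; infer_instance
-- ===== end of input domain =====

-- B replaces A's three passes (filter-exact, filter-<=, then max/min) by one early-exit pass
-- keeping two running candidates; return-value equivalence proved on Pre_ (A raises KeyError
-- on a snapshot without an "iter" key and ValueError on an empty traj).


-- x["iter"] (int() on an int is the identity); total via default 0 — Pre_ guarantees the key is present
def iterKey (x : List (String × Int)) : Int := (List.lookup "iter" x).getD 0

-- ===== PORT A =====
def find_snapshot_by_iter (traj : List (List (String × Int))) (target_iter : Int) : List (String × Int) :=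
  let exact := traj.filter (fun x => iterKey x == target_iter)
  match exact with
  | e :: _ => e
  | [] =>
    let le := traj.filter (fun x => decide (iterKey x ≤ target_iter))
    match le with
    | _ :: _ => (PySem.List.max? le iterKey).getD []
    | [] => (PySem.List.min? traj iterKey).getD []   -- min([]) raises ValueError: excluded by Pre_

-- ===== PORT B =====
def altLoop (t : Int) (bl bm : Option (List (String × Int))) :
    List (List (String × Int)) → List (String × Int)
  | [] =>
    match bl with
    | some b => b
    | none => bm.getD []   -- bm = none only for empty traj, where Source B raises ValueError (excluded by Pre_)
  | x :: rest =>
    let v := iterKey x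
    if v == t then x
    else
      let bl' := if v ≤ t then
          (match bl with | none => some x | some b => if iterKey b < v then some x else some b)
        else bl
      let bm' := match bm with | none => some x | some b => if v < iterKey b then some x else some b
      altLoop t bl' bm' rest

def find_snapshot_by_iter_alt (traj : List (List (String × Int))) (target_iter : Int) : List (String × Int) :=
  altLoop target_iter none none traj

-- ===== PRECONDITION & SPEC =====
-- Pre_ excludes exactly the inputs where Python A raises: an empty traj (ValueError from min)
-- and a traj containing a snapshot without an "iter" key (KeyError).
def Pre_find_snapshot_by_iter (traj : List (List (String × Int))) (target_iter : Int) : Prop :=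
  traj ≠ [] ∧ ∀ x ∈ traj, (List.lookup "iter" x).isSome = true
instance (traj : List (List (String × Int))) (target_iter : Int) : Decidable (Pre_find_snapshot_by_iter traj target_iter) := by unfold Pre_find_snapshot_by_iter; infer_instance

def pvWitness_find_snapshot_by_iter : (List (List (String × Int))) × Int := ([[("iter", 3)], [("iter", 1)]], 2)

def Spec_find_snapshot_by_iter (traj : List (List (String × Int))) (target_iter : Int) (out : List (String × Int)) : Prop := out = find_snapshot_by_iter_alt traj target_iter
instance (traj : List (List (String × Int))) (target_iter : Int) (out : List (String × Int)) : Decidable (Spec_find_snapshot_by_iter traj target_iter out) := by unfold Spec_find_snapshot_by_iter; infer_instance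

-- ===== CLAIM (what is proved, stated in full; the proofs are below) =====
def Claim_equal_find_snapshot_by_iter : Prop := ∀ (traj : List (List (String × Int))) (target_iter : Int), Dom_find_snapshot_by_iter traj target_iter → Pre_find_snapshot_by_iter traj target_iter → Spec_find_snapshot_by_iter traj target_iter (find_snapshot_by_iter traj target_iter)

-- ===== LEMMAS AND PROOFS =====

theorem pv_min?_snoc_none {α κ : Type} [LT κ] [DecidableLT κ] (xs : List α) (x : α) (key : α → κ)
    (h : PySem.List.min? xs key = none) :
    PySem.List.min? (xs ++ [x]) key = some x := by
  have hxs : xs = [] := by rwa [PySem.List.min?_eq_none_iff] at h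
  subst hxs; rfl

theorem pv_min?_snoc_some {α κ : Type} [LT κ] [DecidableLT κ] (xs : List α) (x b : α) (key : α → κ)
    (h : PySem.List.min? xs key = some b) :
    PySem.List.min? (xs ++ [x]) key = if key x < key b then some x else some b := by
  unfold PySem.List.min? at h ⊢
  simp only [List.foldl_append, h, List.foldl_cons, List.foldl_nil]

theorem pv_max?_snoc_none {α κ : Type} [LT κ] [DecidableLT κ] (xs : List α) (x : α) (key : α → κ)
    (h : PySem.List.max? xs key = none) :
    PySem.List.max? (xs ++ [x]) key = some x := by
  have hxs : xs = [] := by rwa [PySem.List.max?_eq_none_iff] at h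
  subst hxs; rfl

theorem pv_max?_snoc_some {α κ : Type} [LT κ] [DecidableLT κ] (xs : List α) (x b : α) (key : α → κ)
    (h : PySem.List.max? xs key = some b) :
    PySem.List.max? (xs ++ [x]) key = if key b < key x then some x else some b := by
  unfold PySem.List.max? at h ⊢
  simp only [List.foldl_append, h, List.foldl_cons, List.foldl_nil]

-- loop invariant: after processing an exact-match-free prefix p, bl is the first maximal
-- ≤-element of p and bm the first minimal element of p, and the loop computes A's value.
theorem altLoop_eq (t : Int) (rest : List (List (String × Int))) :
    ∀ (p : List (List (String × Int))), (∀ x ∈ p, iterKey x ≠ t) →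
    altLoop t (PySem.List.max? (p.filter (fun x => decide (iterKey x ≤ t))) iterKey)
              (PySem.List.min? p iterKey) rest
      = find_snapshot_by_iter (p ++ rest) t := by
  induction rest with
  | nil =>
    intro p hp
    have hex : p.filter (fun x => iterKey x == t) = [] := by
      simp only [List.filter_eq_nil_iff, beq_iff_eq]
      exact hp
    simp only [List.append_nil, find_snapshot_by_iter, hex, altLoop]
    cases hle : p.filter (fun x => decide (iterKey x ≤ t)) with
    | nil => simp [PySem.List.max?]
    | cons a as =>
      have : PySem.List.max? (a :: as) iterKey ≠ none := by
        simp [PySem.List.max?_eq_none_iff]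
      cases hm : PySem.List.max? (a :: as) iterKey with
      | none => exact absurd hm this
      | some b => simp
  | cons x rs ih =>
    intro p hp
    by_cases hv : iterKey x = t
    · -- early return: x is the first exact match of p ++ x :: rs
      have hex : (p ++ x :: rs).filter (fun y => iterKey y == t)
          = x :: rs.filter (fun y => iterKey y == t) := by
        rw [List.filter_append]
        have : p.filter (fun y => iterKey y == t) = [] := by
          simp only [List.filter_eq_nil_iff, beq_iff_eq]; exact hp
        simp [this, hv]
      simp [altLoop, hv, find_snapshot_by_iter, hex]
    · have hp' : ∀ y ∈ p ++ [x], iterKey y ≠ t := by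
        intro y hy
        rcases List.mem_append.mp hy with h | h
        · exact hp y h
        · simp only [List.mem_singleton] at h; subst h; exact hv
      have hfilt : (p ++ [x]).filter (fun y => decide (iterKey y ≤ t))
          = p.filter (fun y => decide (iterKey y ≤ t)) ++ (if iterKey x ≤ t then [x] else []) := by
        rw [List.filter_append]
        by_cases h : iterKey x ≤ t <;> simp [h]
      have h2 := ih (p ++ [x]) hp'
      rw [List.append_assoc, List.singleton_append, hfilt] at h2
      by_cases h : iterKey x ≤ t
      · rw [if_pos h] at h2
        cases hMp : PySem.List.max? (p.filter (fun y => decide (iterKey y ≤ t))) iterKey with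
        | none =>
          rw [pv_max?_snoc_none _ _ _ hMp] at h2
          cases hmp : PySem.List.min? p iterKey with
          | none =>
            rw [pv_min?_snoc_none _ _ _ hmp] at h2
            simpa [altLoop, hv, h, hMp, hmp] using h2
          | some bm =>
            rw [pv_min?_snoc_some _ _ _ _ hmp] at h2
            simpa [altLoop, hv, h, hMp, hmp] using h2
        | some bl =>
          rw [pv_max?_snoc_some _ _ _ _ hMp] at h2
          cases hmp : PySem.List.min? p iterKey with
          | none =>
            rw [pv_min?_snoc_none _ _ _ hmp] at h2
            simpa [altLoop, hv, h, hMp, hmp] using h2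
          | some bm =>
            rw [pv_min?_snoc_some _ _ _ _ hmp] at h2
            simpa [altLoop, hv, h, hMp, hmp] using h2
      · rw [if_neg h, List.append_nil] at h2
        cases hmp : PySem.List.min? p iterKey with
        | none =>
          rw [pv_min?_snoc_none _ _ _ hmp] at h2
          simpa [altLoop, hv, h, hmp] using h2
        | some bm =>
          rw [pv_min?_snoc_some _ _ _ _ hmp] at h2
          simpa [altLoop, hv, h, hmp] using h2

-- ===== VERDICT (by name: the statement is the Claim_ definition above) =====
theorem find_snapshot_by_iter_spec : Claim_equal_find_snapshot_by_iter := by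
  intro traj target_iter _ _
  unfold Spec_find_snapshot_by_iter find_snapshot_by_iter_alt
  have h := altLoop_eq target_iter traj [] (by intro x hx; cases hx)
  simpa [PySem.List.max?, PySem.List.min?] using h.symm
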